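-- pv_equiv track=rewrite | github.com/shamalle/community-detection-in-network | Vertex_Sim_Pagerank_Cen.py | get_top_vertex_pair
-- ===== SOURCE A (Python) =====
-- def calculate_vertex_similarity(G, i, j):
--     if i == j:
--         return 0
--     common_neighbours = len(set(G[i]) & set(G[j]))
--
--     return common_neighbours
--
-- def get_top_vertex_pair(G, nodes):
--     max_pair = None
--     max_sim = 0
--     for i in nodes:
--         for j in nodes:
--             new_sim = calculate_vertex_similarity(G, i, j)  # take the values from the common_neighbours in calculate_vertec_similarity
--             if max_sim < new_sim:
--                 max_pair = (i, j)
--                 max_sim = new_sim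
--
--     # returns the pair with most common neighbours, and the number of common neighbours
--     return (max_pair, max_sim)
-- ===== SOURCE B (Python) =====
-- def get_top_vertex_pair(G, nodes):
--     # distinct node values, first occurrence order
--     ns = []
--     for i in nodes:
--         if i not in ns:
--             ns.append(i)
--     # fewer than two distinct nodes: no pair to rank
--     if len(ns) < 2:
--         return (None, 0)
--     # reverse index: neighbour v -> list of distinct nodes i with v in set(G[i])
--     inv = {}
--     for i in ns:
--         for v in set(G[i]):
--             inv.setdefault(v, []).append(i)
--     # count common neighbours per ordered pair by walking each neighbour's member list
--     cnt = {}
--     for members in inv.values():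
--         for i in members:
--             for j in members:
--                 if i != j:
--                     cnt[(i, j)] = cnt.get((i, j), 0) + 1
--     # earliest strict maximum in nodes x nodes iteration order
--     max_pair = None
--     max_sim = 0
--     for i in nodes:
--         for j in nodes:
--             s = cnt.get((i, j), 0)
--             if max_sim < s:
--                 max_pair = (i, j)
--                 max_sim = s
--     return (max_pair, max_sim)
-- ===== Notes on version B (the rewrite author's own statement) =====
-- stated objective: faster
-- what changed: Instead of computing len(set(G[i]) & set(G[j])) for every ordered node pair, B builds a reverse index neighbour->nodes once, counts common neighbours per ordered pair by walking each neighbour's member list, and then finds the earliest strict maximum in the same nodes x nodes iteration order via O(1) dict lookups.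
import Mathlib
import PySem

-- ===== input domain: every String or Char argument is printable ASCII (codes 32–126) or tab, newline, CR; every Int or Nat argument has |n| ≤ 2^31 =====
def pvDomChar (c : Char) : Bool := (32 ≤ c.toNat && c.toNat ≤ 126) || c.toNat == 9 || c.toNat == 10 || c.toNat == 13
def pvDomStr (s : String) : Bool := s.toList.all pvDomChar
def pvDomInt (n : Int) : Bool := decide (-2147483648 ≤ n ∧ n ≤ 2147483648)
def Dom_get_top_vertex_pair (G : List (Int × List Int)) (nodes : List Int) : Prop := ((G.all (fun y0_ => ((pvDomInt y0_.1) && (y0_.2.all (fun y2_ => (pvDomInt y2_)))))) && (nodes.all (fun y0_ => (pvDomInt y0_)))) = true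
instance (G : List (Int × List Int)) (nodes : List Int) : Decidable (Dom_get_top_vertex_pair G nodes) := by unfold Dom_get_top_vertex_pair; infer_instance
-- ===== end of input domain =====

-- B replaces per-pair set intersections by a reverse neighbour index with pair counting
-- (asymptotically fewer set operations); return values proved equal on Pre_.


-- ===== PORT A =====
-- G[i] is PySem.Dict.getD ⟨G⟩ i []: Python raises KeyError for a missing key; Pre_ excludes that.
def calculate_vertex_similarity (G : List (Int × List Int)) (i j : Int) : Int :=
  if i == j then 0
  else PySem.Set.len (PySem.Set.inter (PySem.Set.ofList (PySem.Dict.getD ⟨G⟩ i []))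
                                      (PySem.Set.ofList (PySem.Dict.getD ⟨G⟩ j [])))

def get_top_vertex_pair (G : List (Int × List Int)) (nodes : List Int) : (Option (Int × Int)) × Int :=
  nodes.foldl (fun st i =>
    nodes.foldl (fun st j =>
      let new_sim := calculate_vertex_similarity G i j
      if st.2 < new_sim then (some (i, j), new_sim) else st) st) (none, 0)

-- ===== PORT B =====
def get_top_vertex_pair_alt (G : List (Int × List Int)) (nodes : List Int) : (Option (Int × Int)) × Int :=
  -- distinct node values, first-occurrence order
  let ns : List Int := nodes.foldl (fun acc i => if acc.contains i then acc else acc ++ [i]) []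
  -- fewer than two distinct nodes: no pair to rank
  if ns.length < 2 then (none, 0) else
  -- reverse index: neighbour v -> list of distinct nodes i with v ∈ set(G[i])
  let inv : PySem.Dict Int (List Int) :=
    ns.foldl (fun d i =>
      (PySem.Set.ofList (PySem.Dict.getD ⟨G⟩ i [])).foldl
        (fun d v => d.modify v [] (· ++ [i])) d) PySem.Dict.empty
  -- count common neighbours per ordered pair
  let cnt : PySem.Dict (Int × Int) Int :=
    inv.values.foldl (fun c members =>
      members.foldl (fun c i =>
        members.foldl (fun c j =>
          if i == j then c else c.insert (i, j) (c.getD (i, j) 0 + 1)) c) c) PySem.Dict.empty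
  -- earliest strict maximum in nodes × nodes iteration order
  nodes.foldl (fun st i =>
    nodes.foldl (fun st j =>
      let s := cnt.getD (i, j) 0
      if st.2 < s then (some (i, j), s) else st) st) (none, 0)

-- ===== PRECONDITION & SPEC =====
-- Pre_ excludes exactly the inputs on which the Python A raises KeyError: nodes holding two
-- distinct values of which some are not keys of G (with at most one distinct node value neither
-- program indexes G; both return (None, 0)).
def Pre_get_top_vertex_pair (G : List (Int × List Int)) (nodes : List Int) : Prop :=
  (∀ x ∈ nodes, ∀ y ∈ nodes, x = y) ∨ ∀ x ∈ nodes, (PySem.Dict.mk G).contains x = true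
instance (G : List (Int × List Int)) (nodes : List Int) : Decidable (Pre_get_top_vertex_pair G nodes) := by unfold Pre_get_top_vertex_pair; infer_instance
def pvWitness_get_top_vertex_pair : (List (Int × List Int)) × List Int :=
  ([(1, [2, 3]), (2, [1, 3]), (3, [])], [1, 2, 3])

def Spec_get_top_vertex_pair (G : List (Int × List Int)) (nodes : List Int) (out : (Option (Int × Int)) × Int) : Prop := out = get_top_vertex_pair_alt G nodes
instance (G : List (Int × List Int)) (nodes : List Int) (out : (Option (Int × Int)) × Int) : Decidable (Spec_get_top_vertex_pair G nodes out) := by unfold Spec_get_top_vertex_pair; infer_instance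

-- ===== CLAIM (what is proved, stated in full; the proofs are below) =====
def Claim_equal_get_top_vertex_pair : Prop := ∀ (G : List (Int × List Int)) (nodes : List Int), Dom_get_top_vertex_pair G nodes → Pre_get_top_vertex_pair G nodes → Spec_get_top_vertex_pair G nodes (get_top_vertex_pair G nodes)

-- ===== LEMMAS AND PROOFS =====

-- set(G[i]) as a PySem.Set
def pvSv (G : List (Int × List Int)) (i : Int) : PySem.Set Int :=
  PySem.Set.ofList (PySem.Dict.getD ⟨G⟩ i [])

-- the flattened (neighbour, node) list B's reverse-index loop walks
def pvL (G : List (Int × List Int)) (nodes : List Int) : List (Int × Int) :=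
  (PySem.Set.ofList nodes).flatMap (fun i => (pvSv G i).map (fun v => (v, i)))

-- B's reverse index, as one fold over pvL
def pvInv (G : List (Int × List Int)) (nodes : List Int) : PySem.Dict Int (List Int) :=
  (pvL G nodes).foldl (fun d p => d.modify p.1 [] (· ++ [p.2])) PySem.Dict.empty

-- the member list of neighbour v
def pvMemb (G : List (Int × List Int)) (nodes : List Int) (v : Int) : List Int :=
  (PySem.Set.ofList nodes).filter (fun i => (pvSv G i).contains v)

-- ordered distinct pairs of a member list
def pvPairs (M : List Int) : List (Int × Int) :=
  M.flatMap (fun a => ((M.filter (fun b => !(a == b))).map (fun b => (a, b))))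

-- B's counter, as one counting fold
def pvCnt (G : List (Int × List Int)) (nodes : List Int) : PySem.Dict (Int × Int) Int :=
  ((pvInv G nodes).values.flatMap pvPairs).foldl
    (fun c p => c.insert p (c.getD p 0 + 1)) PySem.Dict.empty

theorem pv_inner_eq (M : List Int) (i : Int) (c : PySem.Dict (Int × Int) Int) :
    M.foldl (fun c j => if i == j then c else c.insert (i, j) (c.getD (i, j) 0 + 1)) c
      = ((M.filter (fun b => !(i == b))).map (fun b => (i, b))).foldl
          (fun c p => c.insert p (c.getD p 0 + 1)) c := by
  induction M generalizing c with
  | nil => rfl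
  | cons a M ih =>
      simp only [List.foldl_cons, List.filter_cons]
      by_cases h : i = a
      · subst h
        simpa using ih c
      · have hb : (i == a) = false := by simp [h]
        simp only [hb, Bool.not_false, Bool.false_eq_true, if_false]
        exact ih _

-- B's nested loops are exactly the flattened folds
theorem pv_alt_eq (G : List (Int × List Int)) (nodes : List Int) :
    get_top_vertex_pair_alt G nodes
      = if (PySem.Set.ofList nodes).length < 2 then (none, 0)
        else nodes.foldl (fun st i =>
          nodes.foldl (fun st j =>
            let s := (pvCnt G nodes).getD (i, j) 0
            if st.2 < s then (some (i, j), s) else st) st) (none, 0) := by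
  unfold get_top_vertex_pair_alt pvCnt pvInv pvL pvPairs pvSv
  simp only [List.foldl_flatMap, List.foldl_map, pv_inner_eq]
  rfl

theorem pv_filter_beq_of_nodup (l : List Int) (v : Int) (h : l.Nodup) :
    l.filter (fun x => x == v) = if v ∈ l then [v] else [] := by
  induction l with
  | nil => rfl
  | cons a l ih =>
      rw [List.nodup_cons] at h
      rw [List.filter_cons]
      by_cases hav : a = v
      · subst hav
        simp [ih h.2, h.1]
      · have hb : (a == v) = false := beq_eq_false_iff_ne.mpr hav
        simp only [hb, Bool.false_eq_true, if_false]
        rw [ih h.2]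
        have hmem : (v ∈ a :: l) ↔ v ∈ l := by
          rw [List.mem_cons]
          exact or_iff_right (fun hv : v = a => hav hv.symm)
        rw [if_congr hmem rfl rfl]

theorem pv_flatMap_ite (l : List Int) (p : Int → Bool) :
    l.flatMap (fun i => if p i then [i] else []) = l.filter p := by
  induction l with
  | nil => rfl
  | cons a l ih =>
      rw [List.flatMap_cons, List.filter_cons, ih]
      by_cases h : p a <;> simp [h]

theorem pv_getD_inv (G : List (Int × List Int)) (nodes : List Int) (v : Int) :
    (pvInv G nodes).getD v [] = pvMemb G nodes v := by
  unfold pvInv pvMemb pvL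
  rw [PySem.Dict.getD_foldl_modify_append]
  simp only [List.filter_flatMap, List.filter_map, List.map_flatMap, List.map_map]
  have h0 : (PySem.Dict.empty : PySem.Dict Int (List Int)).getD v [] = [] := rfl
  rw [h0, List.nil_append]
  have hstep : ∀ i : Int,
      List.map ((fun (x : Int × Int) => x.2) ∘ fun v' => (v', i))
          (List.filter ((fun (p : Int × Int) => p.1 == v) ∘ fun v' => (v', i)) (pvSv G i))
        = if (pvSv G i).contains v then [i] else [] := by
    intro i
    have h1 : ((fun (p : Int × Int) => p.1 == v) ∘ fun v' => (v', i)) = fun v' => v' == v := rfl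
    rw [h1, pv_filter_beq_of_nodup (pvSv G i) v (by unfold pvSv; exact PySem.Set.nodup_ofList _)]
    by_cases hv : v ∈ pvSv G i
    · simp [hv, PySem.Set.contains]
    · simp [hv, PySem.Set.contains]
  rw [List.flatMap_congr (fun i _ => hstep i)]
  exact pv_flatMap_ite _ _

theorem pv_keys_inv (G : List (Int × List Int)) (nodes : List Int) :
    (pvInv G nodes).keys = PySem.Set.ofList ((pvL G nodes).map (fun p => p.1)) := by
  unfold pvInv
  rw [PySem.Dict.keys_foldl_modify_key (pvL G nodes) (fun p => p.1) [] (fun d p => (· ++ [p.2]))]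
  rfl

theorem pv_nodup_keys_inv (G : List (Int × List Int)) (nodes : List Int) :
    (pvInv G nodes).keys.Nodup := by
  rw [pv_keys_inv]; exact PySem.Set.nodup_ofList _

theorem pv_mem_keys_inv (G : List (Int × List Int)) (nodes : List Int) (v : Int) :
    v ∈ (pvInv G nodes).keys ↔ ∃ i ∈ nodes, v ∈ pvSv G i := by
  rw [pv_keys_inv, PySem.Set.mem_ofList]
  unfold pvL
  simp [PySem.Set.mem_ofList]

theorem pv_values_inv (G : List (Int × List Int)) (nodes : List Int) :
    (pvInv G nodes).values = (pvInv G nodes).keys.map (pvMemb G nodes) := by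
  rw [PySem.Dict.values_eq_map_keys _ (pv_nodup_keys_inv G nodes) []]
  exact List.map_congr_left (fun k _ => pv_getD_inv G nodes k)

theorem pv_mem_memb (G : List (Int × List Int)) (nodes : List Int) (v i : Int) :
    i ∈ pvMemb G nodes v ↔ i ∈ nodes ∧ v ∈ pvSv G i := by
  unfold pvMemb
  simp [List.mem_filter, PySem.Set.mem_ofList, PySem.Set.contains]

theorem pv_nodup_memb (G : List (Int × List Int)) (nodes : List Int) (v : Int) :
    (pvMemb G nodes v).Nodup :=
  List.Nodup.filter _ (PySem.Set.nodup_ofList nodes)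

theorem pv_mem_pvPairs (M : List Int) (p : Int × Int) :
    p ∈ pvPairs M ↔ p.1 ∈ M ∧ p.2 ∈ M ∧ p.1 ≠ p.2 := by
  unfold pvPairs
  cases p with
  | mk a b =>
      simp only [List.mem_flatMap, List.mem_map, List.mem_filter]
      constructor
      · rintro ⟨x, hx, y, ⟨hy, hne⟩, hp⟩
        rw [Prod.mk.injEq] at hp
        obtain ⟨rfl, rfl⟩ := hp
        refine ⟨hx, hy, ?_⟩
        simpa using hne
      · rintro ⟨ha, hb, hne⟩
        refine ⟨a, ha, b, ⟨hb, ?_⟩, rfl⟩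
        simpa using hne

theorem pv_nodup_pvPairs (M : List Int) (h : M.Nodup) : (pvPairs M).Nodup := by
  unfold pvPairs
  rw [List.nodup_flatMap]
  constructor
  · intro a _
    exact List.Nodup.map (fun x y hxy => by simpa using congrArg Prod.snd hxy)
      (List.Nodup.filter _ h)
  · refine h.imp ?_
    intro a b hab p hp hq
    simp only [List.mem_map] at hp hq
    obtain ⟨x, _, rfl⟩ := hp
    obtain ⟨y, _, h2⟩ := hq
    have h3 := congrArg Prod.fst h2
    simp only at h3
    exact hab h3.symm

theorem pv_count_pvPairs (M : List Int) (h : M.Nodup) (i j : Int) :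
    (pvPairs M).count (i, j) = if i ∈ M ∧ j ∈ M ∧ i ≠ j then 1 else 0 := by
  by_cases hm : (i, j) ∈ pvPairs M
  · rw [List.count_eq_one_of_mem (pv_nodup_pvPairs M h) hm]
    rw [pv_mem_pvPairs] at hm
    exact (if_pos ⟨hm.1, hm.2.1, hm.2.2⟩).symm
  · rw [List.count_eq_zero.mpr hm]
    rw [pv_mem_pvPairs] at hm
    exact (if_neg (fun hc => hm ⟨hc.1, hc.2.1, hc.2.2⟩)).symm

theorem pv_getD_cnt (G : List (Int × List Int)) (nodes : List Int) (p : Int × Int) :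
    (pvCnt G nodes).getD p 0
      = (((pvInv G nodes).values.flatMap pvPairs).count p : Int) := by
  unfold pvCnt
  rw [PySem.Dict.getD_foldl_insert_add_one]
  have h0 : (PySem.Dict.empty : PySem.Dict (Int × Int) Int).getD p 0 = 0 := rfl
  rw [h0, zero_add]

-- B's counter equals A's per-pair similarity for nodes i, j
theorem pv_sim_eq (G : List (Int × List Int)) (nodes : List Int)
    (i j : Int) (hi : i ∈ nodes) (hj : j ∈ nodes) :
    (pvCnt G nodes).getD (i, j) 0 = calculate_vertex_similarity G i j := by
  rw [pv_getD_cnt, List.count_flatMap, pv_values_inv, List.map_map]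
  have hcnt : ∀ v ∈ (pvInv G nodes).keys, ((List.count (i, j) ∘ pvPairs) ∘ pvMemb G nodes) v
      = if (fun v => decide (v ∈ pvSv G i ∧ v ∈ pvSv G j ∧ i ≠ j)) v = true then 1 else 0 := by
    intro v _
    show (pvPairs (pvMemb G nodes v)).count (i, j) = _
    rw [pv_count_pvPairs _ (pv_nodup_memb G nodes v)]
    simp only [pv_mem_memb, hi, hj, true_and, decide_eq_true_eq]
  rw [List.map_congr_left hcnt]
  unfold calculate_vertex_similarity
  by_cases hij : i = j
  · subst hij
    simp
  · have hb : (i == j) = false := by simp [hij]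
    rw [hb]
    simp only [Bool.false_eq_true, if_false]
    rw [PySem.List.sum_map_ite_one_zero_nat]
    have hperm : ((pvInv G nodes).keys.filter (fun v => decide (v ∈ pvSv G i ∧ v ∈ pvSv G j ∧ i ≠ j))).Perm
        ((pvSv G i).filter (fun x => (pvSv G j).contains x)) := by
      rw [List.perm_ext_iff_of_nodup
        (List.Nodup.filter _ (pv_nodup_keys_inv G nodes))
        (List.Nodup.filter _ (by unfold pvSv; exact PySem.Set.nodup_ofList _))]
      intro v
      simp only [List.mem_filter, decide_eq_true_eq]
      constructor
      · rintro ⟨_, h1, h2, _⟩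
        exact ⟨h1, by simpa [PySem.Set.contains, List.contains_iff_mem] using h2⟩
      · rintro ⟨h1, h2⟩
        have h2' : v ∈ pvSv G j := by
          simpa [PySem.Set.contains, List.contains_iff_mem] using h2
        exact ⟨(pv_mem_keys_inv G nodes v).mpr ⟨i, hi, h1⟩, h1, h2', hij⟩
    rw [List.countP_eq_length_filter, hperm.length_eq]
    rfl

-- with at most one distinct node value, every visited pair is diagonal and A's state never moves
theorem pv_inner_triv (G : List (Int × List Int)) (l : List Int) (i : Int)
    (st : (Option (Int × Int)) × Int) (h0 : 0 ≤ st.2) (h : ∀ j ∈ l, i = j) :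
    l.foldl (fun st j =>
      let new_sim := calculate_vertex_similarity G i j
      if st.2 < new_sim then (some (i, j), new_sim) else st) st = st := by
  induction l generalizing st with
  | nil => rfl
  | cons a l ih =>
      have hia : i = a := h a (List.mem_cons_self)
      rw [List.foldl_cons]
      have hc : calculate_vertex_similarity G i a = 0 := by
        unfold calculate_vertex_similarity
        simp [hia]
      simp only [hc, if_neg (by omega : ¬ st.2 < 0)]
      exact ih st h0 (fun j hj => h j (List.mem_cons_of_mem a hj))

theorem pv_A_triv (G : List (Int × List Int)) (nodes : List Int)
    (h : ∀ i ∈ nodes, ∀ j ∈ nodes, i = j) :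
    get_top_vertex_pair G nodes = (none, 0) := by
  unfold get_top_vertex_pair
  have : ∀ (l : List Int), (∀ i ∈ l, i ∈ nodes) →
      l.foldl (fun st i =>
        nodes.foldl (fun st j =>
          let new_sim := calculate_vertex_similarity G i j
          if st.2 < new_sim then (some (i, j), new_sim) else st) st)
        ((none : Option (Int × Int)), (0 : Int)) = (none, 0) := by
    intro l hl
    induction l with
    | nil => rfl
    | cons a l ih =>
        rw [List.foldl_cons,
          pv_inner_triv G nodes a (none, 0) (by omega)
            (fun j hj => h a (hl a List.mem_cons_self) j hj),
          ih (fun i hi => hl i (List.mem_cons_of_mem a hi))]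
  exact this nodes (fun i hi => hi)

-- ===== VERDICT (by name: the statement is the Claim_ definition above) =====
theorem get_top_vertex_pair_spec : Claim_equal_get_top_vertex_pair := by
  intro G nodes _ _
  unfold Spec_get_top_vertex_pair
  rw [pv_alt_eq]
  by_cases hlen : (PySem.Set.ofList nodes).length < 2
  · rw [if_pos hlen]
    refine pv_A_triv G nodes ?_
    intro i hi j hj
    have hi' : i ∈ PySem.Set.ofList nodes := (PySem.Set.mem_ofList nodes i).mpr hi
    have hj' : j ∈ PySem.Set.ofList nodes := (PySem.Set.mem_ofList nodes j).mpr hj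
    match hns : PySem.Set.ofList nodes, hlen with
    | [], _ => rw [hns] at hi'; cases hi'
    | [a], _ =>
        rw [hns] at hi' hj'
        rw [List.mem_singleton.mp hi', List.mem_singleton.mp hj']
  · rw [if_neg hlen]
    unfold get_top_vertex_pair
    refine PySem.List.foldl_congr_mem _ _ _ _ ?_
    intro st i hi
    refine PySem.List.foldl_congr_mem _ _ _ _ ?_
    intro st' j hj
    rw [pv_sim_eq G nodes i j hi hj]
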